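-- pv_equiv track=rewrite | github.com/k-sriram/aoc2022 | day22/part1.py | calc_neighbours
-- ===== SOURCE A (Python) =====
-- Position = tuple[int, int]
--
-- DIR = {0: (1, 0), 1: (0, 1), 2: (-1, 0), 3: (0, -1)}
--
-- def calc_neighbours(boardmap: list[list[str]]) -> list[list[list[Position]]]:
--     neighbors: list[list[list[Position]]] = []
--     for y, row in enumerate(boardmap):
--         neighbors.append([])
--         for x, _ in enumerate(row):
--             neighbors[y].append([])
--             for dx, dy in DIR.values():
--                 nx, ny = x + dx, y + dy
--                 if (
--                     0 <= nx < len(row)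
--                     and 0 <= ny < len(boardmap)
--                     and boardmap[ny][nx] != " "
--                 ):
--                     neighbors[y][x].append((nx, ny))
--                 else:
--                     odx, ody = -dx, -dy
--                     i = 1
--                     nx, ny = x + odx * i, y + ody * i
--                     while (
--                         0 <= nx < len(row)
--                         and 0 <= ny < len(boardmap)
--                         and boardmap[ny][nx] != " "
--                     ):
--                         i += 1
--                         nx, ny = x + odx * i, y + ody * i
--                     nx, ny = x + odx * (i - 1), y + ody * (i - 1)
--                     neighbors[y][x].append((nx, ny))
--     return neighbors
-- ===== SOURCE B (Python) =====
-- def _runs(line):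
--     n = len(line)
--     L = [0] * n
--     for i in range(n):
--         L[i] = L[i - 1] if i > 0 and line[i] != " " and line[i - 1] != " " else i
--     R = [0] * n
--     for i in range(n - 1, -1, -1):
--         R[i] = R[i + 1] if i < n - 1 and line[i] != " " and line[i + 1] != " " else i
--     return L, R
--
--
-- def calc_neighbours(boardmap: list[list[str]]) -> list[list[list[tuple[int, int]]]]:
--     H = len(boardmap)
--     rowruns = [_runs(row) for row in boardmap]
--     cols = [list(c) for c in zip(*boardmap)]
--     colruns = [_runs(c) for c in cols]
--     out = []
--     for y, row in enumerate(boardmap):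
--         W = len(row)
--         rl, rr = rowruns[y]
--         orow = []
--         for x in range(W):
--             cl, cr = colruns[x]
--             col = cols[x]
--             cell = []
--             # right
--             if x + 1 < W and row[x + 1] != " ":
--                 cell.append((x + 1, y))
--             elif x >= 1 and row[x - 1] != " ":
--                 cell.append((rl[x - 1], y))
--             else:
--                 cell.append((x, y))
--             # down
--             if y + 1 < H and col[y + 1] != " ":
--                 cell.append((x, y + 1))
--             elif y >= 1 and col[y - 1] != " ":
--                 cell.append((x, cl[y - 1]))
--             else:
--                 cell.append((x, y))
--             # left
--             if x >= 1 and row[x - 1] != " ":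
--                 cell.append((x - 1, y))
--             elif x + 1 < W and row[x + 1] != " ":
--                 cell.append((rr[x + 1], y))
--             else:
--                 cell.append((x, y))
--             # up
--             if y >= 1 and col[y - 1] != " ":
--                 cell.append((x, y - 1))
--             elif y + 1 < H and col[y + 1] != " ":
--                 cell.append((x, cr[y + 1]))
--             else:
--                 cell.append((x, y))
--             orow.append(cell)
--         out.append(orow)
--     return out
-- ===== Notes on version B (the rewrite author's own statement) =====
-- stated objective: faster
-- what changed: A walks a linear wrap-around scan per cell per direction; B precomputes, in one pass per row and per column, run-endpoint arrays (leftmost/rightmost index of each contiguous non-space run) plus a truncating transpose, so every neighbour is an O(1) lookup.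
import Mathlib
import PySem

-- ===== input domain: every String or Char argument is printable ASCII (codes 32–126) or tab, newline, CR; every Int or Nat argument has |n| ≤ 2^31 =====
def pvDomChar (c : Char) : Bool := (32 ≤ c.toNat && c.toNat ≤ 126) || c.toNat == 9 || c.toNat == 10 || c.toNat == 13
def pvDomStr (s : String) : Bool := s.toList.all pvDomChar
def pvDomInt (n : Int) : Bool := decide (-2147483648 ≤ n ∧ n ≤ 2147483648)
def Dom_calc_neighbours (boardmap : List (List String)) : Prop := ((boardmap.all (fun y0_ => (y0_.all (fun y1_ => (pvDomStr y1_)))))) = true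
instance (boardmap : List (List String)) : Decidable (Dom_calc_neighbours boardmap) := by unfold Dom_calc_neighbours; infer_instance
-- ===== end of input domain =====

-- B replaces A's per-cell linear wrap scans by two precomputed run-endpoint arrays per row
-- and per column (O(R*C) total instead of O(R*C*(R+C)) scanning); return values identical.

-- ===== PORT A =====

-- DIR = {0: (1, 0), 1: (0, 1), 2: (-1, 0), 3: (0, -1)}
def pvDIR : PySem.Dict Int (Int × Int) :=
  PySem.Dict.mk [(0, (1, 0)), (1, (0, 1)), (2, (-1, 0)), (3, (0, -1))]

-- boardmap[ny][nx]; exact whenever 0 ≤ ny < len(boardmap) and 0 ≤ nx < len(boardmap[ny]),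
-- which A's code checks before every access it makes on inputs admitted by Pre_.
def pvCellA (b : List (List String)) (ny nx : Int) : String :=
  PySem.List.pyGetD (PySem.List.pyGetD b ny []) nx ""

-- the 'while' loop of A, step for step; fuel only makes it total (A's loop provably
-- stops within len(boardmap) + len(row) steps, and callers pass more fuel than that).
def pvScanA (b : List (List String)) (W x y odx ody : Int) : Nat → Int → Int
  | 0, i => i
  | fuel + 1, i =>
    let nx := x + odx * i
    let ny := y + ody * i
    if 0 ≤ nx ∧ nx < W ∧ 0 ≤ ny ∧ ny < (b.length : Int) ∧ pvCellA b ny nx ≠ " " then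
      pvScanA b W x y odx ody fuel (i + 1)
    else i

def calc_neighbours (boardmap : List (List String)) : List (List (List (Int × Int))) :=
  (PySem.List.enumerate boardmap).map (fun yrow =>
    let y := yrow.1
    let row := yrow.2
    (PySem.List.enumerate row).map (fun xc =>
      let x := xc.1
      (PySem.Dict.values pvDIR).map (fun d =>
        let dx := d.1
        let dy := d.2
        let nx := x + dx
        let ny := y + dy
        if 0 ≤ nx ∧ nx < (row.length : Int) ∧ 0 ≤ ny ∧ ny < (boardmap.length : Int) ∧
            pvCellA boardmap ny nx ≠ " " then
          (nx, ny)
        else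
          let odx := -dx
          let ody := -dy
          let i := pvScanA boardmap (row.length : Int) x y odx ody
                     (boardmap.length + row.length + 2) 1
          (x + odx * (i - 1), y + ody * (i - 1)))))

-- ===== PORT B =====

-- Source B _runs: L pass (left-to-right), carrying the previous character and previous L value
def pvRunLgo : List String → Nat → Option (String × Int) → List Int
  | [], _, _ => []
  | c :: rest, i, prev =>
    let v : Int :=
      match prev with
      | some pv => if c ≠ " " ∧ pv.1 ≠ " " then pv.2 else (i : Int)
      | none => (i : Int)
    v :: pvRunLgo rest (i + 1) (some (c, v))

def pvRunL (line : List String) : List Int := pvRunLgo line 0 none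

-- Source B _runs: R pass (right-to-left): R[i] from R[i+1]
def pvRunR : List String → Nat → List Int
  | [], _ => []
  | c :: rest, i =>
    let rs := pvRunR rest (i + 1)
    let v : Int :=
      match rest, rs with
      | c' :: _, v' :: _ => if c ≠ " " ∧ c' ≠ " " then v' else (i : Int)
      | _, _ => (i : Int)
    v :: rs

lemma pvColsSumTailLe : ∀ (b : List (List String)),
    ((b.map (fun r => r.tail)).map List.length).sum ≤ (b.map List.length).sum := by
  intro b
  induction b with
  | nil => simp
  | cons r rest ih =>
    simp only [List.map_cons, List.sum_cons]
    have : r.tail.length ≤ r.length := by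
      cases r <;> simp
    omega

lemma pvColsDec (b : List (List String)) (hne : b ≠ []) (hall : b.all (fun r => r ≠ []) = true) :
    ((b.map (fun r => r.tail)).map List.length).sum < (b.map List.length).sum := by
  cases b with
  | nil => exact absurd rfl hne
  | cons r rest =>
    simp only [List.map_cons, List.sum_cons]
    have h1 : r ≠ [] := by
      simp only [List.all_cons, Bool.and_eq_true, decide_eq_true_eq] at hall
      exact hall.1
    have h2 : r.tail.length < r.length := by
      cases r with
      | nil => exact absurd rfl h1
      | cons a t => simp
    have := pvColsSumTailLe rest
    omega

-- cols = [list(c) for c in zip(*boardmap)] : truncating transpose, column by column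
def pvCols (b : List (List String)) : List (List String) :=
  if h : b ≠ [] ∧ b.all (fun r => r ≠ []) = true then
    (b.map (fun r => r.headD "")) :: pvCols (b.map (fun r => r.tail))
  else []
termination_by (b.map List.length).sum
decreasing_by simpa using pvColsDec b h.1 h.2

def calc_neighbours_alt (boardmap : List (List String)) : List (List (List (Int × Int))) :=
  let H := boardmap.length
  let rowruns := boardmap.map (fun r => (pvRunL r, pvRunR r 0))
  let cols := pvCols boardmap
  let colruns := cols.map (fun c => (pvRunL c, pvRunR c 0))
  (PySem.List.enumerate boardmap).map (fun yrow =>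
    let y := yrow.1
    let row := yrow.2
    let W := row.length
    let rl := (PySem.List.pyGetD rowruns y ([], [])).1
    let rr := (PySem.List.pyGetD rowruns y ([], [])).2
    (List.range W).map (fun x =>
      let cl := (colruns.getD x ([], [])).1
      let cr := (colruns.getD x ([], [])).2
      let col := cols.getD x []
      [ -- right
        (if x + 1 < W ∧ row.getD (x + 1) "" ≠ " " then ((x : Int) + 1, y)
         else if 1 ≤ x ∧ row.getD (x - 1) "" ≠ " " then (rl.getD (x - 1) 0, y)
         else ((x : Int), y)),
        -- down
        (if y + 1 < (H : Int) ∧ PySem.List.pyGetD col (y + 1) "" ≠ " " then ((x : Int), y + 1)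
         else if 1 ≤ y ∧ PySem.List.pyGetD col (y - 1) "" ≠ " " then
           ((x : Int), PySem.List.pyGetD cl (y - 1) 0)
         else ((x : Int), y)),
        -- left
        (if 1 ≤ x ∧ row.getD (x - 1) "" ≠ " " then ((x : Int) - 1, y)
         else if x + 1 < W ∧ row.getD (x + 1) "" ≠ " " then (rr.getD (x + 1) 0, y)
         else ((x : Int), y)),
        -- up
        (if 1 ≤ y ∧ PySem.List.pyGetD col (y - 1) "" ≠ " " then ((x : Int), y - 1)
         else if y + 1 < (H : Int) ∧ PySem.List.pyGetD col (y + 1) "" ≠ " " then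
           ((x : Int), PySem.List.pyGetD cr (y + 1) 0)
         else ((x : Int), y)) ]))

-- ===== PRECONDITION & SPEC =====

-- Pre_ excludes exactly the ragged boards (two rows of different length): on every such
-- board A raises IndexError (a vertical probe indexes a shorter neighbouring row);
-- wherever A returns a value, all rows have equal length and Pre_ holds.
def Pre_calc_neighbours (boardmap : List (List String)) : Prop :=
  ∀ row ∈ boardmap, row.length = (boardmap.headD []).length

instance (boardmap : List (List String)) : Decidable (Pre_calc_neighbours boardmap) := by
  unfold Pre_calc_neighbours; infer_instance

def pvWitness_calc_neighbours : List (List String) := [[".", " "], ["#", "."]]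

def Spec_calc_neighbours (boardmap : List (List String)) (out : List (List (List (Int × Int)))) : Prop := out = calc_neighbours_alt boardmap
instance (boardmap : List (List String)) (out : List (List (List (Int × Int)))) : Decidable (Spec_calc_neighbours boardmap out) := by unfold Spec_calc_neighbours; infer_instance

-- ===== CLAIM (what is proved, stated in full; the proofs are below) =====
def Claim_equal_calc_neighbours : Prop := ∀ (boardmap : List (List String)), Dom_calc_neighbours boardmap → Pre_calc_neighbours boardmap → Spec_calc_neighbours boardmap (calc_neighbours boardmap)

-- ===== LEMMAS AND PROOFS =====

-- The leftmost index of the contiguous non-space run ending at x (the value _runs' L[x] holds).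
def runSpecL (line : List String) : Nat → Int
  | 0 => 0
  | x + 1 =>
    if line.getD (x + 1) "" ≠ " " ∧ line.getD x "" ≠ " " then runSpecL line x
    else ((x : Int) + 1)

-- The rightmost index of the contiguous non-space run starting at x (_runs' R[x]).
def runSpecR (line : List String) (x : Nat) : Int :=
  if h : x + 1 < line.length ∧ line.getD x "" ≠ " " ∧ line.getD (x + 1) "" ≠ " " then
    runSpecR line (x + 1)
  else (x : Int)
termination_by line.length - x

-- A's backward wrap scan along one line, probing p, p-1, …; returns (last good p) i.e. p+1 at failure.
def loopL (line : List String) (p : Int) : Int :=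
  if h : 0 ≤ p ∧ p < (line.length : Int) ∧ line.getD p.toNat "" ≠ " " then loopL line (p - 1)
  else p + 1
termination_by (p + 1).toNat
decreasing_by omega

def loopR (line : List String) (p : Int) : Int :=
  if h : 0 ≤ p ∧ p < (line.length : Int) ∧ line.getD p.toNat "" ≠ " " then loopR line (p + 1)
  else p - 1
termination_by ((line.length : Int) + 1 - p).toNat
decreasing_by omega

-- column x of the board, as a line
def colMap (b : List (List String)) (x : Nat) : List String :=
  b.map (fun r => r.getD x "")

lemma loopL_eq_runSpecL (line : List String) : ∀ (p : Nat), p < line.length →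
    line.getD p "" ≠ " " → loopL line (p : Int) = runSpecL line p := by
  intro p
  induction p with
  | zero =>
    intro hl hc
    rw [loopL, dif_pos ⟨by omega, by exact_mod_cast hl, by simpa using hc⟩]
    rw [loopL, dif_neg (by omega)]
    simp [runSpecL]
  | succ x ih =>
    intro hl hc
    rw [loopL, dif_pos ⟨by omega, by exact_mod_cast hl, by simpa using hc⟩]
    have hcast : ((x : Int) + 1 - 1) = (x : Int) := by omega
    have hcast2 : ((x + 1 : Nat) : Int) - 1 = (x : Int) := by omega
    rw [hcast2]
    by_cases hx : line.getD x "" ≠ " "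
    · rw [ih (by omega) hx, runSpecL, if_pos ⟨hc, hx⟩]
    · rw [not_not] at hx
      rw [loopL, dif_neg (by simp only [Int.toNat_natCast]; tauto)]
      rw [runSpecL, if_neg (by tauto)]

lemma loopR_eq_runSpecR (line : List String) : ∀ (d p : Nat), line.length - p ≤ d → p < line.length →
    line.getD p "" ≠ " " → loopR line (p : Int) = runSpecR line p := by
  intro d
  induction d with
  | zero => intro p hd hl hc; omega
  | succ d ih =>
    intro p hd hl hc
    rw [loopR, dif_pos ⟨by omega, by exact_mod_cast hl, by simpa using hc⟩]
    by_cases hx : p + 1 < line.length ∧ line.getD (p + 1) "" ≠ " "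
    · have hcast : ((p : Int) + 1) = ((p + 1 : Nat) : Int) := by omega
      rw [hcast, ih (p + 1) (by omega) hx.1 hx.2]
      conv_rhs => rw [runSpecR]
      rw [dif_pos ⟨hx.1, hc, hx.2⟩]
    · rw [loopR, dif_neg ?_, runSpecR, dif_neg (by tauto)]
      · omega
      · intro ⟨h1, h2, h3⟩
        have hcast : (p : Int) + 1 = ((p + 1 : Nat) : Int) := by omega
        rw [hcast, Int.toNat_natCast] at h3
        exact hx ⟨by omega, h3⟩


lemma pvRunLgo_getD (line : List String) : ∀ (k n : Nat) (prev : Option (String × Int)),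
    (prev = none ∧ n = 0 ∨
      ∃ c v, prev = some (c, v) ∧ 0 < n ∧ c = line.getD (n - 1) "" ∧ v = runSpecL line (n - 1)) →
    (pvRunLgo (line.drop n) n prev).getD k 0 =
      if n + k < line.length then runSpecL line (n + k) else 0 := by
  intro k
  induction k with
  | zero =>
    intro n prev hinv
    by_cases hn : n < line.length
    · have hdrop : line.drop n = line.getD n "" :: line.drop (n + 1) := by
        rw [List.getD_eq_getElem line "" hn]
        exact List.drop_eq_getElem_cons hn
      rw [hdrop, if_pos (by omega)]
      rcases hinv with ⟨hp, hn0⟩ | ⟨c, v, hp, hn0, hc, hv⟩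
      · subst hp hn0
        simp [pvRunLgo, runSpecL]
      · subst hp
        obtain ⟨m, rfl⟩ : ∃ m, n = m + 1 := ⟨n - 1, by omega⟩
        simp only [Nat.add_sub_cancel] at hc hv
        subst hc hv
        simp only [pvRunLgo, List.getD_cons_zero]
        rw [runSpecL]
        split_ifs with h1 h2 h2 <;> tauto
    · rw [List.drop_eq_nil_of_le (by omega)]
      simp only [pvRunLgo, List.getD_nil]
      rw [if_neg (by omega)]
  | succ k ih =>
    intro n prev hinv
    by_cases hn : n < line.length
    · have hdrop : line.drop n = line.getD n "" :: line.drop (n + 1) := by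
        rw [List.getD_eq_getElem line "" hn]
        exact List.drop_eq_getElem_cons hn
      rw [hdrop]
      have hveq : ∀ (w : Int), w = runSpecL line n →
          (pvRunLgo (line.getD n "" :: line.drop (n + 1)) n prev).getD (k + 1) 0 =
          (pvRunLgo (line.drop (n + 1)) (n + 1) (some (line.getD n "", runSpecL line n))).getD k 0 := by
        intro w hw
        rcases hinv with ⟨hp, hn0⟩ | ⟨c, v, hp, hn0, hc, hv⟩
        · subst hp hn0
          simp [pvRunLgo, runSpecL]
        · subst hp
          obtain ⟨m, rfl⟩ : ∃ m, n = m + 1 := ⟨n - 1, by omega⟩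
          simp only [Nat.add_sub_cancel] at hc hv
          subst hc hv
          simp only [pvRunLgo, List.getD_cons_succ]
          have : (if line.getD (m + 1) "" ≠ " " ∧ line.getD m "" ≠ " " then runSpecL line m
              else ((m + 1 : Nat) : Int)) = runSpecL line (m + 1) := by
            rw [runSpecL]
            split_ifs with h1 <;> simp
          rw [this]
      rw [hveq (runSpecL line n) rfl]
      rw [ih (n + 1) (some (line.getD n "", runSpecL line n))
        (Or.inr ⟨line.getD n "", runSpecL line n, rfl, by omega, by simp, by simp⟩)]
      have harith : n + 1 + k = n + (k + 1) := by omega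
      rw [harith]
    · rw [List.drop_eq_nil_of_le (by omega)]
      simp only [pvRunLgo, List.getD_nil]
      rw [if_neg (by omega)]

lemma pvRunL_getD (line : List String) (x : Nat) (hx : x < line.length) :
    (pvRunL line).getD x 0 = runSpecL line x := by
  have := pvRunLgo_getD line x 0 none (Or.inl ⟨rfl, rfl⟩)
  simpa [pvRunL, if_pos hx] using this

lemma pvRunR_length : ∀ (l : List String) (i : Nat), (pvRunR l i).length = l.length := by
  intro l
  induction l with
  | nil => intro i; simp [pvRunR]
  | cons c rest ih => intro i; simp [pvRunR, ih]

lemma pvRunR_getD_aux (line : List String) : ∀ (d n : Nat), line.length - n ≤ d → ∀ (k : Nat),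
    (pvRunR (line.drop n) n).getD k 0 =
      if n + k < line.length then runSpecR line (n + k) else 0 := by
  intro d
  induction d with
  | zero =>
    intro n hd k
    rw [List.drop_eq_nil_of_le (by omega)]
    simp only [pvRunR, List.getD_nil]
    rw [if_neg (by omega)]
  | succ d ih =>
    intro n hd k
    by_cases hn : n < line.length
    · have hdrop : line.drop n = line.getD n "" :: line.drop (n + 1) := by
        rw [List.getD_eq_getElem line "" hn]
        exact List.drop_eq_getElem_cons hn
      rw [hdrop]
      simp only [pvRunR]
      have hv : (match line.drop (n + 1), pvRunR (line.drop (n + 1)) (n + 1) with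
          | c' :: _, v' :: _ => if line.getD n "" ≠ " " ∧ c' ≠ " " then v' else (n : Int)
          | _, _ => (n : Int)) = runSpecR line n := by
        by_cases hn1 : n + 1 < line.length
        · have hdrop1 : line.drop (n + 1) = line.getD (n + 1) "" :: line.drop (n + 1 + 1) := by
            rw [List.getD_eq_getElem line "" hn1]
            exact List.drop_eq_getElem_cons hn1
          rw [hdrop1]
          have hlen : pvRunR (line.getD (n + 1) "" :: line.drop (n + 1 + 1)) (n + 1) ≠ [] := by
            intro hcon
            have := pvRunR_length (line.getD (n + 1) "" :: line.drop (n + 1 + 1)) (n + 1)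
            rw [hcon] at this
            simp at this
          obtain ⟨v0, vs, hvs⟩ := List.exists_cons_of_ne_nil hlen
          rw [hvs]
          have hv0 : v0 = runSpecR line (n + 1) := by
            have h0 := ih (n + 1) (by omega) 0
            rw [hdrop1, hvs] at h0
            simpa [if_pos (by omega : n + 1 + 0 < line.length)] using h0
          rw [hv0]
          simp only []
          conv_rhs => rw [runSpecR]
          split_ifs with h1 h2 h2 <;> tauto
        · rw [List.drop_eq_nil_of_le (by omega)]
          simp only [pvRunR]
          rw [runSpecR, dif_neg (by tauto)]
      cases k with
      | zero =>
        simp only [List.getD_cons_zero]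
        rw [hv, if_pos (by omega), Nat.add_zero]
      | succ k =>
        simp only [List.getD_cons_succ]
        rw [ih (n + 1) (by omega) k]
        have harith : n + 1 + k = n + (k + 1) := by omega
        rw [harith]
    · rw [List.drop_eq_nil_of_le (by omega)]
      simp only [pvRunR, List.getD_nil]
      rw [if_neg (by omega)]

lemma pvRunR_getD (line : List String) (x : Nat) (hx : x < line.length) :
    (pvRunR line 0).getD x 0 = runSpecR line x := by
  have := pvRunR_getD_aux line line.length 0 (by omega) x
  simpa [if_pos hx] using this


lemma pvCellA_eq (b : List (List String)) (ny nx : Int) (h1 : 0 ≤ ny) (h2 : 0 ≤ nx) :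
    pvCellA b ny nx = (b.getD ny.toNat []).getD nx.toNat "" := by
  obtain ⟨m, rfl⟩ : ∃ m : Nat, ny = (m : Int) := ⟨ny.toNat, (Int.toNat_of_nonneg h1).symm⟩
  obtain ⟨j, rfl⟩ : ∃ j : Nat, nx = (j : Int) := ⟨nx.toNat, (Int.toNat_of_nonneg h2).symm⟩
  simp [pvCellA]

lemma scanA_dec (b : List (List String)) (W x y odx ody : Int) (line : List String) (s : Int)
    (hcond : ∀ i : Int,
      (0 ≤ x + odx * i ∧ x + odx * i < W ∧ 0 ≤ y + ody * i ∧ y + ody * i < (b.length : Int) ∧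
        pvCellA b (y + ody * i) (x + odx * i) ≠ " ")
        ↔ (0 ≤ s - i ∧ s - i < (line.length : Int) ∧ line.getD (s - i).toNat "" ≠ " ")) :
    ∀ (fuel : Nat) (i : Int), 0 ≤ i → (s - i + 1).toNat + 1 ≤ fuel →
      s - pvScanA b W x y odx ody fuel i + 1 = loopL line (s - i) := by
  intro fuel
  induction fuel with
  | zero => intro i h0 hf; omega
  | succ f ih =>
    intro i h0 hf
    by_cases hc : 0 ≤ s - i ∧ s - i < (line.length : Int) ∧ line.getD (s - i).toNat "" ≠ " "
    · rw [pvScanA]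
      rw [if_pos ((hcond i).mpr hc)]
      rw [loopL, dif_pos hc]
      have := ih (i + 1) (by omega) (by omega)
      rw [this]
      congr 1
      omega
    · rw [pvScanA]
      rw [if_neg (fun hcontra => hc ((hcond i).mp hcontra))]
      rw [loopL, dif_neg hc]

lemma scanA_inc (b : List (List String)) (W x y odx ody : Int) (line : List String) (s : Int)
    (hcond : ∀ i : Int,
      (0 ≤ x + odx * i ∧ x + odx * i < W ∧ 0 ≤ y + ody * i ∧ y + ody * i < (b.length : Int) ∧
        pvCellA b (y + ody * i) (x + odx * i) ≠ " ")
        ↔ (0 ≤ s + i ∧ s + i < (line.length : Int) ∧ line.getD (s + i).toNat "" ≠ " ")) :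
    ∀ (fuel : Nat) (i : Int), 0 ≤ i → ((line.length : Int) - (s + i) + 1).toNat + 1 ≤ fuel →
      s + pvScanA b W x y odx ody fuel i - 1 = loopR line (s + i) := by
  intro fuel
  induction fuel with
  | zero => intro i h0 hf; omega
  | succ f ih =>
    intro i h0 hf
    by_cases hc : 0 ≤ s + i ∧ s + i < (line.length : Int) ∧ line.getD (s + i).toNat "" ≠ " "
    · rw [pvScanA]
      rw [if_pos ((hcond i).mpr hc)]
      rw [loopR, dif_pos hc]
      have := ih (i + 1) (by omega) (by omega)
      rw [this]
      congr 1
      omega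
    · rw [pvScanA]
      rw [if_neg (fun hcontra => hc ((hcond i).mp hcontra))]
      rw [loopR, dif_neg hc]

lemma getD_map' {α β : Type} (f : α → β) (l : List α) (k : Nat) (hk : k < l.length)
    (d : β) (d0 : α) : (l.map f).getD k d = f (l.getD k d0) := by
  rw [List.getD_eq_getElem _ _ (by simpa using hk), List.getElem_map,
    List.getD_eq_getElem _ _ hk]

lemma tail_getD {α : Type} (r : List α) (x : Nat) (d : α) :
    r.tail.getD x d = r.getD (x + 1) d := by
  cases r <;> simp [List.getD]

lemma pvCols_rect : ∀ (W : Nat) (b : List (List String)), b ≠ [] →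
    (∀ r ∈ b, r.length = W) →
    pvCols b = (List.range W).map (fun x => b.map (fun r => r.getD x "")) := by
  intro W
  induction W with
  | zero =>
    intro b hne hall
    rw [pvCols, dif_neg]
    · simp
    · intro ⟨h1, h2⟩
      cases b with
      | nil => exact hne rfl
      | cons r rest =>
        simp only [List.all_cons, Bool.and_eq_true, decide_eq_true_eq] at h2
        have := hall r (by simp)
        exact h2.1 (List.eq_nil_of_length_eq_zero this)
  | succ W ih =>
    intro b hne hall
    rw [pvCols, dif_pos ?_]
    · have htails : ∀ r ∈ b.map (fun r => r.tail), r.length = W := by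
        intro r hr
        obtain ⟨r0, hr0, rfl⟩ := List.mem_map.mp hr
        have := hall r0 hr0
        cases r0 with
        | nil => simp at this
        | cons a t => simpa using this
      rw [ih (b.map (fun r => r.tail)) (by simpa using hne) htails]
      rw [List.range_succ_eq_map]
      rw [List.map_cons, List.map_map]
      refine List.cons_eq_cons.mpr ⟨?_, ?_⟩
      · apply List.map_congr_left
        intro r hr
        cases r <;> simp [List.getD]
      · apply List.map_congr_left
        intro xx hxx
        simp only [Function.comp_apply, List.map_map]
        apply List.map_congr_left
        intro r hr
        simpa [Nat.succ_eq_add_one] using tail_getD r xx ""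
    · refine ⟨hne, ?_⟩
      rw [List.all_eq_true]
      intro r hr
      have := hall r hr
      simp only [decide_eq_true_eq]
      intro hcon
      rw [hcon] at this
      simp at this

lemma loopL_of_cases (line : List String) (t : Nat) (ht : t < line.length) :
    (if 1 ≤ t ∧ line.getD (t - 1) "" ≠ " " then (pvRunL line).getD (t - 1) 0 else (t : Int)) =
      loopL line ((t : Int) - 1) := by
  by_cases hb : 1 ≤ t ∧ line.getD (t - 1) "" ≠ " "
  · rw [if_pos hb]
    rw [pvRunL_getD line (t - 1) (by omega), ← loopL_eq_runSpecL line (t - 1) (by omega) hb.2]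
    congr 1
    omega
  · rw [if_neg hb]
    have hcond : ¬(0 ≤ (t : Int) - 1 ∧ (t : Int) - 1 < (line.length : Int) ∧
        line.getD ((t : Int) - 1).toNat "" ≠ " ") := by
      rintro ⟨c1, c2, c3⟩
      have e : ((t : Int) - 1).toNat = t - 1 := by omega
      rw [e] at c3
      exact hb ⟨by omega, c3⟩
    rw [loopL, dif_neg hcond]
    omega

lemma loopR_of_cases (line : List String) (t : Nat) :
    (if t + 1 < line.length ∧ line.getD (t + 1) "" ≠ " " then (pvRunR line 0).getD (t + 1) 0
      else (t : Int)) = loopR line ((t : Int) + 1) := by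
  by_cases hb : t + 1 < line.length ∧ line.getD (t + 1) "" ≠ " "
  · rw [if_pos hb]
    rw [pvRunR_getD line (t + 1) hb.1, ← loopR_eq_runSpecR line line.length (t + 1) (by omega) hb.1 hb.2]
    congr 1
  · rw [if_neg hb]
    have hcond : ¬(0 ≤ (t : Int) + 1 ∧ (t : Int) + 1 < (line.length : Int) ∧
        line.getD ((t : Int) + 1).toNat "" ≠ " ") := by
      rintro ⟨c1, c2, c3⟩
      have e : ((t : Int) + 1).toNat = t + 1 := by omega
      rw [e] at c3
      exact hb ⟨by omega, c3⟩
    rw [loopR, dif_neg hcond]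
    omega

theorem calc_neighbours_spec : Claim_equal_calc_neighbours := by
  intro b _ hpre
  unfold Spec_calc_neighbours
  unfold Pre_calc_neighbours at hpre
  rw [calc_neighbours, calc_neighbours_alt]
  apply List.map_congr_left
  intro p hp
  obtain ⟨k, hk, rfl⟩ := (PySem.List.mem_enumerate_iff _ _ _).mp hp
  simp only [zero_add]
  apply List.ext_getElem
  · simp [PySem.List.length_enumerate]
  · intro x h1 h2
    rw [List.getElem_map, List.getElem_map, PySem.List.getElem_enumerate, List.getElem_range]
    have hx : x < b[k].length := by simpa [PySem.List.length_enumerate] using h1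
    simp only [pvDIR, PySem.Dict.values_mk, List.map_cons, List.map_nil, List.cons.injEq,
      and_true]
    have hbne : b ≠ [] := by
      intro hcon
      rw [hcon] at hk
      simp at hk
    have hrow : b.getD k [] = b[k] := List.getD_eq_getElem _ _ hk
    have hrowlen : b[k].length = (b.headD []).length := hpre b[k] (List.getElem_mem hk)
    have hxW : x < (b.headD []).length := hrowlen ▸ hx
    have hrange : (List.range (b.headD []).length).getD x 0 = x := by
      rw [List.getD_eq_getElem _ _ (by simpa using hxW), List.getElem_range]
    have hcolsx : (pvCols b).getD x [] = colMap b x := by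
      rw [pvCols_rect _ b hbne hpre, getD_map' _ _ x (by simpa using hxW) _ 0, hrange, colMap]
    have hcolruns : ((pvCols b).map (fun r => (pvRunL r, pvRunR r 0))).getD x ([], []) =
        (pvRunL (colMap b x), pvRunR (colMap b x) 0) := by
      rw [pvCols_rect _ b hbne hpre, List.map_map,
        getD_map' _ _ x (by simpa using hxW) _ 0, hrange]
      rfl
    have hrowruns : PySem.List.pyGetD (b.map (fun r => (pvRunL r, pvRunR r 0))) (k : Int) ([], []) =
        (pvRunL b[k], pvRunR b[k] 0) := by
      rw [PySem.List.pyGetD_natCast, getD_map' _ _ k hk _ [], hrow]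
    have hcmlen : (colMap b x).length = b.length := by simp [colMap]
    have hcmget : ∀ m : Nat, m < b.length → (colMap b x).getD m "" = (b.getD m []).getD x "" := by
      intro m hm
      rw [colMap, getD_map' _ _ m hm _ []]
    refine ⟨?_, ?_, ?_, ?_⟩
    · -- direction right (1, 0)
      have hceq : (0 ≤ 0 + (x : Int) + 1 ∧ 0 + (x : Int) + 1 < (b[k].length : Int) ∧
            0 ≤ (k : Int) + 0 ∧ (k : Int) + 0 < (b.length : Int) ∧
            pvCellA b ((k : Int) + 0) (0 + (x : Int) + 1) ≠ " ")
          ↔ (x + 1 < b[k].length ∧ b[k].getD (x + 1) "" ≠ " ") := by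
        have hc5 : pvCellA b ((k : Int) + 0) (0 + (x : Int) + 1) = b[k].getD (x + 1) "" := by
          rw [pvCellA_eq b _ _ (by omega) (by omega)]
          have e1 : ((k : Int) + 0).toNat = k := by omega
          have e2 : (0 + (x : Int) + 1).toNat = x + 1 := by omega
          rw [e1, e2, hrow]
        rw [hc5]
        constructor
        · rintro ⟨c1, c2, c3, c4, c5⟩
          exact ⟨by omega, c5⟩
        · rintro ⟨c1, c2⟩
          exact ⟨by omega, by omega, by omega, by omega, c2⟩
      by_cases hc : x + 1 < b[k].length ∧ b[k].getD (x + 1) "" ≠ " "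
      · rw [if_pos (hceq.mpr hc), if_pos hc]
        simp only [Prod.mk.injEq]
        constructor <;> omega
      · rw [if_neg (fun hcontra => hc (hceq.mp hcontra)), if_neg hc]
        have hscan := scanA_dec b (b[k].length : Int) (0 + (x : Int)) (k : Int) (-1) (-0)
          b[k] (x : Int) ?_ (b.length + b[k].length + 2) 1 (by omega) (by omega)
        · rw [← apply_ite (fun z : Int => (z, (k : Int)))]
          rw [hrowruns]
          have hB := loopL_of_cases b[k] x hx
          simp only [Prod.mk.injEq]
          constructor
          · show 0 + (x : Int) + -1 * (pvScanA b (b[k].length : Int) (0 + (x : Int)) (k : Int)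
              (-1) (-0) (b.length + b[k].length + 2) 1 - 1) =
              if 1 ≤ x ∧ b[k].getD (x - 1) "" ≠ " " then (pvRunL b[k]).getD (x - 1) 0 else (x : Int)
            rw [hB]
            omega
          · show (k : Int) + -0 * _ = (k : Int)
            omega
        · intro i
          have e1 : 0 + (x : Int) + -1 * i = (x : Int) - i := by ring
          have e2 : (k : Int) + -0 * i = (k : Int) := by ring
          rw [e1, e2]
          constructor
          · rintro ⟨c1, c2, c3, c4, c5⟩
            rw [pvCellA_eq b _ _ (by omega) (by omega)] at c5
            have e3 : ((k : Int)).toNat = k := by omega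
            rw [e3, hrow] at c5
            exact ⟨c1, c2, c5⟩
          · rintro ⟨c1, c2, c3⟩
            refine ⟨c1, c2, by omega, by omega, ?_⟩
            rw [pvCellA_eq b _ _ (by omega) (by omega)]
            have e3 : ((k : Int)).toNat = k := by omega
            rw [e3, hrow]
            exact c3
    · -- direction down (0, 1)
      rw [hcolsx, hcolruns]
      have hceq : (0 ≤ 0 + (x : Int) + 0 ∧ 0 + (x : Int) + 0 < (b[k].length : Int) ∧
            0 ≤ (k : Int) + 1 ∧ (k : Int) + 1 < (b.length : Int) ∧
            pvCellA b ((k : Int) + 1) (0 + (x : Int) + 0) ≠ " ")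
          ↔ ((k : Int) + 1 < (b.length : Int) ∧
              PySem.List.pyGetD (colMap b x) ((k : Int) + 1) "" ≠ " ") := by
        have e0 : (k : Int) + 1 = ((k + 1 : Nat) : Int) := by omega
        rw [e0, PySem.List.pyGetD_natCast]
        constructor
        · rintro ⟨c1, c2, c3, c4, c5⟩
          rw [pvCellA_eq b _ _ (by omega) (by omega)] at c5
          have e1 : (((k + 1 : Nat) : Int)).toNat = k + 1 := by omega
          have e2 : (0 + (x : Int) + 0).toNat = x := by omega
          rw [e1, e2] at c5
          rw [hcmget (k + 1) (by exact_mod_cast c4)]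
          exact ⟨c4, c5⟩
        · rintro ⟨c1, c2⟩
          rw [hcmget (k + 1) (by exact_mod_cast c1)] at c2
          refine ⟨by omega, by push_cast; omega, by omega, c1, ?_⟩
          rw [pvCellA_eq b _ _ (by omega) (by omega)]
          have e1 : (((k + 1 : Nat) : Int)).toNat = k + 1 := by omega
          have e2 : (0 + (x : Int) + 0).toNat = x := by omega
          rw [e1, e2]
          exact c2
      by_cases hc : (k : Int) + 1 < (b.length : Int) ∧
          PySem.List.pyGetD (colMap b x) ((k : Int) + 1) "" ≠ " "
      · rw [if_pos (hceq.mpr hc), if_pos hc]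
        simp only [Prod.mk.injEq, and_true]
        omega
      · rw [if_neg (fun hcontra => hc (hceq.mp hcontra)), if_neg hc]
        have hscan := scanA_dec b (b[k].length : Int) (0 + (x : Int)) (k : Int) (-0) (-1)
          (colMap b x) (k : Int) ?_ (b.length + b[k].length + 2) 1 (by omega) (by omega)
        · by_cases hk1 : 1 ≤ k
          · have e0 : (k : Int) - 1 = ((k - 1 : Nat) : Int) := by omega
            rw [e0, PySem.List.pyGetD_natCast, PySem.List.pyGetD_natCast]
            have hiff : (1 ≤ (k : Int) ∧ (colMap b x).getD (k - 1) "" ≠ " ")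
                ↔ (1 ≤ k ∧ (colMap b x).getD (k - 1) "" ≠ " ") := by
              constructor <;> (rintro ⟨c1, c2⟩; exact ⟨by omega, c2⟩)
            rw [if_congr hiff rfl rfl, ← apply_ite (fun z : Int => ((x : Int), z))]
            have hB := loopL_of_cases (colMap b x) k (by rw [hcmlen]; exact hk)
            rw [hB]
            simp only [Prod.mk.injEq]
            constructor <;> omega
          · have hk0 : k = 0 := by omega
            subst hk0
            rw [if_neg (by intro hcon; exact absurd hcon.1 (by norm_num))]
            rw [loopL, dif_neg (by rintro ⟨c1, c2, c3⟩; omega)] at hscan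
            simp only [Prod.mk.injEq]
            constructor <;> omega
        · intro i
          have e1 : 0 + (x : Int) + -0 * i = (x : Int) := by ring
          have e2 : (k : Int) + -1 * i = (k : Int) - i := by ring
          rw [e1, e2, hcmlen]
          constructor
          · rintro ⟨c1, c2, c3, c4, c5⟩
            rw [pvCellA_eq b _ _ (by omega) (by omega)] at c5
            have e3 : ((x : Int)).toNat = x := by omega
            rw [e3] at c5
            rw [hcmget ((k : Int) - i).toNat (by omega)]
            exact ⟨c3, c4, c5⟩
          · rintro ⟨c1, c2, c3⟩
            rw [hcmget ((k : Int) - i).toNat (by omega)] at c3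
            refine ⟨by omega, by push_cast; omega, c1, c2, ?_⟩
            rw [pvCellA_eq b _ _ (by omega) (by omega)]
            have e3 : ((x : Int)).toNat = x := by omega
            rw [e3]
            exact c3
    · -- direction left (-1, 0)
      have hceq : (0 ≤ 0 + (x : Int) + -1 ∧ 0 + (x : Int) + -1 < (b[k].length : Int) ∧
            0 ≤ (k : Int) + 0 ∧ (k : Int) + 0 < (b.length : Int) ∧
            pvCellA b ((k : Int) + 0) (0 + (x : Int) + -1) ≠ " ")
          ↔ (1 ≤ x ∧ b[k].getD (x - 1) "" ≠ " ") := by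
        constructor
        · rintro ⟨c1, c2, c3, c4, c5⟩
          rw [pvCellA_eq b _ _ (by omega) (by omega)] at c5
          have e1 : ((k : Int) + 0).toNat = k := by omega
          have e2 : (0 + (x : Int) + -1).toNat = x - 1 := by omega
          rw [e1, e2, hrow] at c5
          exact ⟨by omega, c5⟩
        · rintro ⟨c1, c2⟩
          refine ⟨by omega, by omega, by omega, by omega, ?_⟩
          rw [pvCellA_eq b _ _ (by omega) (by omega)]
          have e1 : ((k : Int) + 0).toNat = k := by omega
          have e2 : (0 + (x : Int) + -1).toNat = x - 1 := by omega
          rw [e1, e2, hrow]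
          exact c2
      by_cases hc : 1 ≤ x ∧ b[k].getD (x - 1) "" ≠ " "
      · rw [if_pos (hceq.mpr hc), if_pos hc]
        simp only [Prod.mk.injEq]
        constructor <;> omega
      · rw [if_neg (fun hcontra => hc (hceq.mp hcontra)), if_neg hc]
        have hscan := scanA_inc b (b[k].length : Int) (0 + (x : Int)) (k : Int) (- -1) (-0)
          b[k] (x : Int) ?_ (b.length + b[k].length + 2) 1 (by omega) (by omega)
        · rw [← apply_ite (fun z : Int => (z, (k : Int)))]
          rw [hrowruns]
          have hB := loopR_of_cases b[k] x
          simp only [Prod.mk.injEq]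
          rw [hB]
          constructor <;> omega
        · intro i
          have e1 : 0 + (x : Int) + - -1 * i = (x : Int) + i := by ring
          have e2 : (k : Int) + -0 * i = (k : Int) := by ring
          rw [e1, e2]
          constructor
          · rintro ⟨c1, c2, c3, c4, c5⟩
            rw [pvCellA_eq b _ _ (by omega) (by omega)] at c5
            have e3 : ((k : Int)).toNat = k := by omega
            rw [e3, hrow] at c5
            exact ⟨c1, c2, c5⟩
          · rintro ⟨c1, c2, c3⟩
            refine ⟨c1, c2, by omega, by omega, ?_⟩
            rw [pvCellA_eq b _ _ (by omega) (by omega)]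
            have e3 : ((k : Int)).toNat = k := by omega
            rw [e3, hrow]
            exact c3
    · -- direction up (0, -1)
      rw [hcolsx, hcolruns]
      have hceq : (0 ≤ 0 + (x : Int) + 0 ∧ 0 + (x : Int) + 0 < (b[k].length : Int) ∧
            0 ≤ (k : Int) + -1 ∧ (k : Int) + -1 < (b.length : Int) ∧
            pvCellA b ((k : Int) + -1) (0 + (x : Int) + 0) ≠ " ")
          ↔ (1 ≤ (k : Int) ∧ PySem.List.pyGetD (colMap b x) ((k : Int) - 1) "" ≠ " ") := by
        constructor
        · rintro ⟨c1, c2, c3, c4, c5⟩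
          rw [pvCellA_eq b _ _ (by omega) (by omega)] at c5
          have e0 : (k : Int) - 1 = ((k - 1 : Nat) : Int) := by omega
          rw [e0, PySem.List.pyGetD_natCast, hcmget (k - 1) (by omega)]
          have e1 : ((k : Int) + -1).toNat = k - 1 := by omega
          have e2 : (0 + (x : Int) + 0).toNat = x := by omega
          rw [e1, e2] at c5
          exact ⟨by omega, c5⟩
        · rintro ⟨c1, c2⟩
          have e0 : (k : Int) - 1 = ((k - 1 : Nat) : Int) := by omega
          rw [e0, PySem.List.pyGetD_natCast, hcmget (k - 1) (by omega)] at c2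
          refine ⟨by omega, by push_cast; omega, by omega, by omega, ?_⟩
          rw [pvCellA_eq b _ _ (by omega) (by omega)]
          have e1 : ((k : Int) + -1).toNat = k - 1 := by omega
          have e2 : (0 + (x : Int) + 0).toNat = x := by omega
          rw [e1, e2]
          exact c2
      by_cases hc : 1 ≤ (k : Int) ∧ PySem.List.pyGetD (colMap b x) ((k : Int) - 1) "" ≠ " "
      · rw [if_pos (hceq.mpr hc), if_pos hc]
        simp only [Prod.mk.injEq]
        constructor <;> omega
      · rw [if_neg (fun hcontra => hc (hceq.mp hcontra)), if_neg hc]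
        have hscan := scanA_inc b (b[k].length : Int) (0 + (x : Int)) (k : Int) (-0) (- -1)
          (colMap b x) (k : Int) ?_ (b.length + b[k].length + 2) 1 (by omega) (by omega)
        · have e0 : (k : Int) + 1 = ((k + 1 : Nat) : Int) := by omega
          rw [e0, PySem.List.pyGetD_natCast, PySem.List.pyGetD_natCast]
          have hiff : ((((k + 1 : Nat) : Int)) < (b.length : Int) ∧
                (colMap b x).getD (k + 1) "" ≠ " ")
              ↔ (k + 1 < (colMap b x).length ∧ (colMap b x).getD (k + 1) "" ≠ " ") := by
            rw [hcmlen]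
            constructor <;> (rintro ⟨c1, c2⟩; exact ⟨by exact_mod_cast c1, c2⟩)
          rw [if_congr hiff rfl rfl, ← apply_ite (fun z : Int => ((x : Int), z))]
          have hB := loopR_of_cases (colMap b x) k
          rw [hB]
          simp only [Prod.mk.injEq]
          constructor <;> omega
        · intro i
          have e1 : 0 + (x : Int) + -0 * i = (x : Int) := by ring
          have e2 : (k : Int) + - -1 * i = (k : Int) + i := by ring
          rw [e1, e2, hcmlen]
          constructor
          · rintro ⟨c1, c2, c3, c4, c5⟩
            rw [pvCellA_eq b _ _ (by omega) (by omega)] at c5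
            have e3 : ((x : Int)).toNat = x := by omega
            rw [e3] at c5
            rw [hcmget ((k : Int) + i).toNat (by omega)]
            exact ⟨c3, c4, c5⟩
          · rintro ⟨c1, c2, c3⟩
            rw [hcmget ((k : Int) + i).toNat (by omega)] at c3
            refine ⟨by omega, by push_cast; omega, c1, c2, ?_⟩
            rw [pvCellA_eq b _ _ (by omega) (by omega)]
            have e3 : ((x : Int)).toNat = x := by omega
            rw [e3]
            exact c3
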